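-- pv_equiv track=rewrite | github.com/psncl/freeCodeCamp-daily-challenges | 2025/12 (December)/2025-12-21/Solution.py | daylight_hours
-- ===== SOURCE A (Python) =====
-- def daylight_hours(latitude: int) -> int:
--
--     # Map latitudes to daylight hours in ascending order.
--     latitude_to_daylight: dict[int, int] = {
--         -90: 24,
--         -75: 23,
--         -60: 21,
--         -45: 15,
--         -30: 13,
--         -15: 12,
--         0: 12,
--         15:	11,
--         30:	10,
--         45:	9,
--         60:	6,
--         75:	2,
--         90:	0,
--     }
--
--     if latitude in latitude_to_daylight:
--         return latitude_to_daylight[latitude]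
--
--     # Sort the keys just in case the converting the keys() view object to a list changed the order.
--     lat_keys = sorted(list(latitude_to_daylight.keys()))
--
--     for i in range(len(lat_keys)):
--         current = lat_keys[i]
--
--         if latitude < current:
--             # No need to check out of bounds below because latitude cannot be lower than -90.
--             # Therefore, this if block will never be triggered when i = 0.
--             prev = lat_keys[i-1]
--
--             return latitude_to_daylight[current] if abs(current - latitude) < abs(prev - latitude) else latitude_to_daylight[prev]
-- ===== SOURCE B (Python) =====
-- def daylight_hours(latitude: int) -> int:
--     # Closed form: round latitude to the nearest multiple of 15 (keys are
--     # -90..90 step 15; the gap is odd, so integer inputs never tie), clamp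
--     # to the table range, and index a flat list of hours.
--     hours = [24, 23, 21, 15, 13, 12, 12, 11, 10, 9, 6, 2, 0]
--     nearest = max(-90, min(90, 15 * ((latitude + 7) // 15)))
--     return hours[(nearest + 90) // 15]
-- ===== Notes on version B (the rewrite author's own statement) =====
-- stated objective: simpler
-- what changed: Replaced the dict, membership test, key sort and linear first-greater scan by a closed form: round to the nearest multiple of 15 with integer floor division, clamp to [-90,90], and index a flat 13-element list.
-- outside the precondition, e.g. on daylight_hours(91): A returns None, B returns 0
import Mathlib
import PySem

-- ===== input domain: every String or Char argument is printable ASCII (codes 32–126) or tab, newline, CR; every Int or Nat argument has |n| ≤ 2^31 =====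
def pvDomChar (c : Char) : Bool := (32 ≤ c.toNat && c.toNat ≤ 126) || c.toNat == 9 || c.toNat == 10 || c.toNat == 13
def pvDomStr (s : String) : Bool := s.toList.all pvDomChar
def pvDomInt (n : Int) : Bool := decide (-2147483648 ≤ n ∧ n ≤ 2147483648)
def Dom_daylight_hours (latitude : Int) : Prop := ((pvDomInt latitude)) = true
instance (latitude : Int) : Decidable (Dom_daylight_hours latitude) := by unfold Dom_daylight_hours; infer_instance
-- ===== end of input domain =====

-- B replaces A's dict + sort + linear first-greater scan by a closed form
-- (round to nearest multiple of 15, clamp, index a flat list): simpler, O(1).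

-- ===== PORT A =====
-- the literal dict of A
def pvTableA : PySem.Dict Int Int :=
  PySem.Dict.ofList [(-90, 24), (-75, 23), (-60, 21), (-45, 15), (-30, 13),
                     (-15, 12), (0, 12), (15, 11), (30, 10), (45, 9),
                     (60, 6), (75, 2), (90, 0)]

-- the 'for i in range(len(lat_keys))' loop with its early returns; the
-- fall-through (Python returns None there) is outside Pre_ and yields 0.
def pvLoopA (latitude : Int) (lat_keys : List Int) (i : Nat) : List Int → Int
  | [] => 0
  | current :: rest =>
    -- current = lat_keys[i]; we walk the suffix of lat_keys starting at i
    if latitude < current then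
      let prev := PySem.List.pyGetD lat_keys ((i : Int) - 1) 0
      if |current - latitude| < |prev - latitude| then
        pvTableA.getD current 0
      else
        pvTableA.getD prev 0
    else
      pvLoopA latitude lat_keys (i + 1) rest

def daylight_hours (latitude : Int) : Int :=
  if pvTableA.contains latitude then
    pvTableA.getD latitude 0
  else
    let lat_keys := PySem.List.sorted pvTableA.keys (fun x => x) false
    pvLoopA latitude lat_keys 0 lat_keys

-- ===== PORT B =====
def daylight_hours_alt (latitude : Int) : Int :=
  let hours : List Int := [24, 23, 21, 15, 13, 12, 12, 11, 10, 9, 6, 2, 0]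
  let nearest := max (-90) (min 90 (15 * PySem.Int.floordiv (latitude + 7) 15))
  PySem.List.pyGetD hours (PySem.Int.floordiv (nearest + 90) 15) 0

-- ===== PRECONDITION & SPEC =====
-- Pre_ excludes latitude > 90, where A falls off its loop and returns None,
-- which is not a value of the declared int return type.
def Pre_daylight_hours (latitude : Int) : Prop := latitude ≤ 90
instance (latitude : Int) : Decidable (Pre_daylight_hours latitude) := by
  unfold Pre_daylight_hours; infer_instance

def pvWitness_daylight_hours : Int := 40

def Spec_daylight_hours (latitude : Int) (out : Int) : Prop := out = daylight_hours_alt latitude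
instance (latitude : Int) (out : Int) : Decidable (Spec_daylight_hours latitude out) := by unfold Spec_daylight_hours; infer_instance

-- ===== CLAIM (what is proved, stated in full; the proofs are below) =====
def Claim_equal_daylight_hours : Prop := ∀ (latitude : Int), Dom_daylight_hours latitude → Pre_daylight_hours latitude → Spec_daylight_hours latitude (daylight_hours latitude)

-- ===== LEMMAS AND PROOFS =====

-- the sorted key list of A's table, named as a literal
theorem pvKeysA_eq :
    PySem.List.sorted pvTableA.keys (fun x => x) false =
      [-90, -75, -60, -45, -30, -15, 0, 15, 30, 45, 60, 75, 90] := by decide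

-- below -90, A's membership test fails and its loop returns dict[-90] = 24 at i = 0
theorem pvA_low (latitude : Int) (h : latitude < -90) : daylight_hours latitude = 24 := by
  have hmk : pvTableA = PySem.Dict.mk [(-90, 24), (-75, 23), (-60, 21), (-45, 15), (-30, 13),
      (-15, 12), (0, 12), (15, 11), (30, 10), (45, 9), (60, 6), (75, 2), (90, 0)] := by decide
  unfold daylight_hours
  rw [if_neg (by rw [hmk]; simp [PySem.Dict.contains_mk]; omega)]
  simp only [pvKeysA_eq]
  rw [pvLoopA]
  rw [if_pos h]
  simp only [Nat.cast_zero, zero_sub, Int.reduceNeg]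
  have hc : PySem.List.pyGetD [(-90:Int), -75, -60, -45, -30, -15, 0, 15, 30, 45, 60, 75, 90]
      (-1 : Int) 0 = 90 := by decide
  rw [hc]
  rw [if_pos (by rw [abs_of_pos (by omega), abs_of_pos (by omega)]; omega)]
  decide

-- below -90, B clamps to -90 and returns 24
theorem pvB_low (latitude : Int) (h : latitude < -90) : daylight_hours_alt latitude = 24 := by
  have hq : PySem.Int.floordiv (latitude + 7) 15 < -5 := by
    rw [PySem.Int.floordiv_lt_iff_lt_mul (by norm_num)]
    omega
  simp only [daylight_hours_alt]
  have h1 : min 90 (15 * PySem.Int.floordiv (latitude + 7) 15)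
      = 15 * PySem.Int.floordiv (latitude + 7) 15 := min_eq_right (by omega)
  have h2 : max (-90) (15 * PySem.Int.floordiv (latitude + 7) 15) = -90 :=
    max_eq_left (by omega)
  rw [h1, h2]
  decide

-- the finite band -90 ≤ latitude ≤ 90, checked pointwise
set_option maxRecDepth 8192 in
theorem pvFin : ∀ n : Nat, n < 181 →
    daylight_hours ((n : Int) - 90) = daylight_hours_alt ((n : Int) - 90) := by decide

-- ===== VERDICT (by name: the statement is the Claim_ definition above) =====
theorem daylight_hours_spec : Claim_equal_daylight_hours := by
  intro latitude _hdom hpre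
  unfold Spec_daylight_hours
  by_cases hl : latitude < -90
  · rw [pvA_low latitude hl, pvB_low latitude hl]
  · have hp : latitude ≤ 90 := hpre
    have hn : latitude = ((latitude + 90).toNat : Int) - 90 := by omega
    rw [hn]
    exact pvFin (latitude + 90).toNat (by omega)
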